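-- pv_equiv track=rewrite | github.com/abhinav-gautam/leetcode | Topicwise/Hashmap/3720. Lexicographically Smallest Permutation Greater Than Target.py | lexGreaterPermutation
-- ===== SOURCE A (Python) =====
-- from collections import Counter
--
-- def lexGreaterPermutation(s: str, target: str) -> str:
--     n = len(s)
--     s = sorted(s)
--     count = Counter(s)
--     result = []
--
--     def dfs(idx, greater):
--         if idx == n:
--             return "".join(result) if greater else ""
--
--         for ch in sorted(count.keys()):
--             if count[ch] == 0:
--                 continue
--             if not greater:
--                 if ch < target[idx]:
--                     continue
--                 if ch == target[idx]:
--                     count[ch] -= 1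
--                     result.append(ch)
--                     ans = dfs(idx + 1, False)
--                     if ans:
--                         return ans
--                     result.pop()
--                     count[ch] += 1
--                     continue
--             count[ch] -= 1
--             result.append(ch)
--             ans = dfs(idx + 1, True)
--             if ans:
--                 return ans
--             result.pop()
--             count[ch] += 1
--         return ""
--
--     return dfs(0, False)
-- ===== SOURCE B (Python) =====
-- def lexGreaterPermutation(s: str, target: str) -> str:
--     n = len(s)
--     pool = sorted(s)              # ascending multiset of available characters
--     prefixes = [pool]             # prefixes[i] = pool left after matching target[:i]
--     m = 0
--     while m < n and m < len(target) and target[m] in pool: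
--         pool = pool.copy()
--         pool.remove(target[m])    # pool stays sorted (removes one equal char)
--         prefixes.append(pool)
--         m += 1
--     if m == len(target) and m < n:
--         # target fully matched and strictly shorter: any completion is greater
--         return target + "".join(prefixes[m])
--     # try break positions i = m, m-1, ..., 0: keep target[:i], place the
--     # smallest remaining char > target[i], fill the rest ascending
--     for i in range(m, -1, -1):
--         rem = prefixes[i]
--         if i < n:
--             for j in range(len(rem)):
--                 if rem[j] > target[i]:
--                     return target[:i] + rem[j] + "".join(rem[:j] + rem[j + 1:])
--     return ""
-- ===== Notes on version B (the rewrite author's own statement) =====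
-- stated objective: alternative
-- what changed: A's recursive backtracking over a Counter (re-sorting the key set at every node) is replaced by an iterative two-phase greedy: match the longest feasible prefix of target while stacking the remaining sorted pools, then scan break positions from deepest to shallowest, placing the smallest remaining char greater than target[i] and the rest in ascending order.
-- crash fix: When target is strictly shorter than s and target's multiset is contained in s's, A raises IndexError (it indexes target[idx] past its end while extending the fully matched prefix); B returns target followed by the remaining characters in ascending order, the smallest permutation strictly greater than target. — e.g. on lexGreaterPermutation("ab", "a"): A raises IndexError, B returns "ab"
import Mathlib
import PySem

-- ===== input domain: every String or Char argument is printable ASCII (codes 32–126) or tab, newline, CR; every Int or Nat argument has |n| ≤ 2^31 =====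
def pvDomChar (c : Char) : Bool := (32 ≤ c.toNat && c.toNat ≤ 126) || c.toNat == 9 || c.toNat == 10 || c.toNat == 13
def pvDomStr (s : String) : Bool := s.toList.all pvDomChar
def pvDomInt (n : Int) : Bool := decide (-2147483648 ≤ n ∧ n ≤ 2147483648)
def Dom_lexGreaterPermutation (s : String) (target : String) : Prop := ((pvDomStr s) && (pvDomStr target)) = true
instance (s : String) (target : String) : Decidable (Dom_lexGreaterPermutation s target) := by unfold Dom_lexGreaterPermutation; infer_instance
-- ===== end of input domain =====

-- B replaces A's recursive backtracking over a Counter by an iterative two-phase greedy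
-- (match the longest prefix of target, then try break positions deepest-first); same results,
-- proved equal on Pre_; where A raises IndexError, B returns the intended answer (Raises_ block).

-- ===== PORT A =====
-- Python's target[idx] raises IndexError when idx ≥ len(target); Pre_ excludes exactly the
-- inputs reaching that, so the default ' ' of getD below is never consulted on Pre_.
mutual
def pvA_dfs (t : List Char) : Nat → Nat → Bool → PySem.Dict Char Int → List Char → String
  | 0, _idx, greater, _count, result => if greater then String.ofList result else ""
  | fuel+1, idx, greater, count, result =>
      pvA_loop t fuel idx greater count result
        (PySem.List.sorted count.keys (fun x => x) false)

def pvA_loop (t : List Char) (fuel idx : Nat) (greater : Bool)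
    (count : PySem.Dict Char Int) (result : List Char) : List Char → String
  | [] => ""
  | ch :: rest =>
      if count.getD ch 0 = 0 then
        pvA_loop t fuel idx greater count result rest
      else if greater = false ∧ ch < t.getD idx ' ' then
        pvA_loop t fuel idx greater count result rest
      else if greater = false ∧ ch = t.getD idx ' ' then
        let ans := pvA_dfs t fuel (idx+1) false (count.modify ch 0 (· - 1)) (result ++ [ch])
        if ans = "" then pvA_loop t fuel idx greater count result rest else ans
      else
        let ans := pvA_dfs t fuel (idx+1) true (count.modify ch 0 (· - 1)) (result ++ [ch])
        if ans = "" then pvA_loop t fuel idx greater count result rest else ans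
end

def lexGreaterPermutation (s : String) (target : String) : String :=
  let n := s.toList.length
  let sSorted := PySem.List.sorted s.toList (fun x => x) false
  let count := PySem.Dict.counter sSorted
  pvA_dfs target.toList n 0 false count []

-- ===== PORT B =====
-- scan for the first char of rem greater than c: returns (rem[:j], rem[j], rem[j+1:])
def pvB_find (c : Char) : List Char → Option (List Char × Char × List Char)
  | [] => none
  | x :: xs =>
      if c < x then some ([], x, xs)
      else
        match pvB_find c xs with
        | some (a, y, b) => some (x :: a, y, b)
        | none => none

-- phase 1: match target's prefix, stacking the successive remaining pools (head = newest);
-- pool.erase = Python list.remove of a char known to be present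
def pvB_walk (t : List Char) (n : Nat) : Nat → Nat → List Char → List (List Char) → Nat × List (List Char)
  | 0, m, _pool, stack => (m, stack)
  | fuel+1, m, pool, stack =>
      if m < t.length ∧ t.getD m ' ' ∈ pool then
        let pool' := pool.erase (t.getD m ' ')
        pvB_walk t n fuel (m+1) pool' (pool' :: stack)
      else (m, stack)

-- phase 2: break positions i = m, m-1, …, 0 (i = rest.length)
def pvB_phase2 (t : List Char) (n : Nat) : List (List Char) → String
  | [] => ""
  | rem :: rest =>
      let i := rest.length
      if i < n then
        match pvB_find (t.getD i ' ') rem with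
        | some (a, y, b) => String.ofList (t.take i ++ y :: (a ++ b))
        | none => pvB_phase2 t n rest
      else pvB_phase2 t n rest

def lexGreaterPermutation_alt (s : String) (target : String) : String :=
  let t := target.toList
  let n := s.toList.length
  let pool := PySem.List.sorted s.toList (fun x => x) false
  let r := pvB_walk t n n 0 pool [pool]
  if r.1 = t.length ∧ r.1 < n then String.ofList (t ++ r.2.headD [])
  else pvB_phase2 t n r.2

-- ===== PRECONDITION & SPEC =====
-- Pre_ excludes exactly the inputs where A raises IndexError: target strictly shorter than s
-- with target's character multiset contained in s's (see Raises_ below; A returns everywhere else).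
def Pre_lexGreaterPermutation (s : String) (target : String) : Prop :=
  ¬ (target.toList.length < s.toList.length ∧
     ∀ c ∈ target.toList, target.toList.count c ≤ s.toList.count c)
instance (s : String) (target : String) : Decidable (Pre_lexGreaterPermutation s target) := by
  unfold Pre_lexGreaterPermutation; infer_instance

def pvWitness_lexGreaterPermutation : String × String := ("ba", "ab")

-- On these inputs A raises IndexError (target[idx] past its end while extending the fully
-- matched prefix); B returns target followed by the remaining characters ascending.
def Raises_lexGreaterPermutation (s : String) (target : String) : Prop :=
  target.toList.length < s.toList.length ∧
  ∀ c ∈ target.toList, target.toList.count c ≤ s.toList.count c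
instance (s : String) (target : String) : Decidable (Raises_lexGreaterPermutation s target) := by
  unfold Raises_lexGreaterPermutation; infer_instance

def pvRaiseWitness_lexGreaterPermutation : String × String := ("ab", "a")
def pvRaiseWitnessOut_lexGreaterPermutation : String := "ab"

def Spec_lexGreaterPermutation (s : String) (target : String) (out : String) : Prop :=
  out = lexGreaterPermutation_alt s target
instance (s : String) (target : String) (out : String) : Decidable (Spec_lexGreaterPermutation s target out) := by
  unfold Spec_lexGreaterPermutation; infer_instance

-- ===== CLAIM (what is proved, stated in full; the proofs are below) =====
def Claim_equal_lexGreaterPermutation : Prop := ∀ (s : String) (target : String), Dom_lexGreaterPermutation s target → Pre_lexGreaterPermutation s target → Spec_lexGreaterPermutation s target (lexGreaterPermutation s target)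

def Claim_raises_lexGreaterPermutation : Prop := (∀ (s : String) (target : String), Dom_lexGreaterPermutation s target → Raises_lexGreaterPermutation s target → ¬ Pre_lexGreaterPermutation s target) ∧ (Dom_lexGreaterPermutation (pvRaiseWitness_lexGreaterPermutation.1) (pvRaiseWitness_lexGreaterPermutation.2) ∧ Raises_lexGreaterPermutation (pvRaiseWitness_lexGreaterPermutation.1) (pvRaiseWitness_lexGreaterPermutation.2) ∧ lexGreaterPermutation_alt (pvRaiseWitness_lexGreaterPermutation.1) (pvRaiseWitness_lexGreaterPermutation.2) = pvRaiseWitnessOut_lexGreaterPermutation)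

-- ===== LEMMAS AND PROOFS =====

-- relation between A's Counter state and the sorted multiset (pool) of remaining characters
structure PoolRel (L : List Char) (count : PySem.Dict Char Int) (pool : List Char) : Prop where
  keys : count.keys = PySem.Set.ofList L
  cnt : ∀ c, count.getD c 0 = (pool.count c : Int)
  sorted : pool.Pairwise (· ≤ ·)
  sub : ∀ c ∈ pool, c ∈ L

theorem rel_zero_iff {L count pool} (h : PoolRel L count pool) (c : Char) :
    count.getD c 0 = 0 ↔ c ∉ pool := by
  rw [h.cnt c]
  constructor
  · intro h0 hc
    have := List.count_pos_iff.mpr hc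
    omega
  · intro hc
    have : pool.count c = 0 := List.count_eq_zero.mpr hc
    simp [this]

theorem rel_erase {L count pool} (h : PoolRel L count pool) {x : Char} (hx : x ∈ pool) :
    PoolRel L (count.modify x 0 (· - 1)) (pool.erase x) := by
  have hcont : count.contains x = true := by
    rw [PySem.Dict.contains_iff_mem_keys, h.keys]
    exact (PySem.Set.mem_ofList _ _).mpr (h.sub x hx)
  refine ⟨?_, ?_, ?_, ?_⟩
  · show (count.insert x _).keys = _
    rw [PySem.Dict.keys_insert_of_contains _ _ hcont, h.keys]
  · intro c
    show (count.insert x _).getD c 0 = _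
    rw [PySem.Dict.getD_insert]
    by_cases hc : c = x
    · subst hc
      rw [if_pos rfl, h.cnt c, List.count_erase_self]
      have := List.count_pos_iff.mpr hx
      push_cast
      omega
    · rw [if_neg hc, h.cnt c, List.count_erase_of_ne hc]
  · exact h.sorted.sublist (List.erase_sublist ..)
  · exact fun c hc => h.sub c (List.mem_of_mem_erase hc)

theorem head_le {pool : List Char} {h : Char} {pr : List Char}
    (hs : pool.Pairwise (· ≤ ·)) (he : pool = h :: pr) : ∀ c ∈ pool, h ≤ c := by
  subst he
  intro c hc
  rcases List.mem_cons.mp hc with rfl | hc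
  · exact le_refl _
  · exact (List.pairwise_cons.mp hs).1 c hc

theorem ofList_ne_empty {l : List Char} (h : l ≠ []) : String.ofList l ≠ "" := by
  intro he
  apply h
  have : (String.ofList l).toList = ("" : String).toList := by rw [he]
  simpa using this

theorem find_some_spec (x : Char) : ∀ (pool a : List Char) (y : Char) (b : List Char),
    pvB_find x pool = some (a, y, b) →
    pool = a ++ y :: b ∧ (∀ c ∈ a, ¬ x < c) ∧ x < y := by
  intro pool
  induction pool with
  | nil => intro a y b h; simp [pvB_find] at h
  | cons k rest ih =>
    intro a y b h
    by_cases hk : x < k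
    · rw [pvB_find, if_pos hk] at h
      obtain ⟨rfl, rfl, rfl⟩ : a = [] ∧ k = y ∧ rest = b := by
        simpa using h
      exact ⟨rfl, by simp, hk⟩
    · rw [pvB_find, if_neg hk] at h
      cases hf : pvB_find x rest with
      | none => rw [hf] at h; simp at h
      | some p =>
        obtain ⟨a', y', b'⟩ := p
        rw [hf] at h
        obtain ⟨rfl, rfl, rfl⟩ : k :: a' = a ∧ y' = y ∧ b' = b := by
          simpa using h
        obtain ⟨h1, h2, h3⟩ := ih a' y' b' hf
        exact ⟨by simp [h1], by
          intro c hc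
          rcases List.mem_cons.mp hc with rfl | hc
          · exact hk
          · exact h2 c hc, h3⟩

theorem find_none_spec (x : Char) : ∀ (pool : List Char),
    pvB_find x pool = none → ∀ c ∈ pool, ¬ x < c := by
  intro pool
  induction pool with
  | nil => intro _ c hc; simp at hc
  | cons k rest ih =>
    intro h c hc
    by_cases hk : x < k
    · rw [pvB_find, if_pos hk] at h; simp at h
    · rw [pvB_find, if_neg hk] at h
      cases hf : pvB_find x rest with
      | none =>
        rcases List.mem_cons.mp hc with rfl | hc
        · exact hk
        · exact ih hf c hc
      | some p => obtain ⟨a', y', b'⟩ := p; rw [hf] at h; simp at h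

-- A's dfs in greater mode appends the remaining multiset in ascending order
theorem dfs_greater (t L : List Char) : ∀ (fuel idx : Nat) (count : PySem.Dict Char Int)
    (pool result : List Char), PoolRel L count pool → pool.length = fuel → result ≠ [] →
    pvA_dfs t fuel idx true count result = String.ofList (result ++ pool) := by
  intro fuel
  induction fuel with
  | zero =>
    intro idx count pool result hRel hlen hres
    have hnil : pool = [] := List.eq_nil_of_length_eq_zero hlen
    subst hnil
    simp [pvA_dfs]
  | succ fuel ih =>
    intro idx count pool result hRel hlen hres
    obtain ⟨h, pr, rfl⟩ : ∃ h pr, pool = h :: pr := by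
      cases pool with
      | nil => simp at hlen
      | cons a b => exact ⟨a, b, rfl⟩
    have hhead : ∀ c ∈ h :: pr, h ≤ c := head_le hRel.sorted rfl
    have key : ∀ ks : List Char, ks.Pairwise (· < ·) → h ∈ ks →
        pvA_loop t fuel idx true count result ks = String.ofList (result ++ h :: pr) := by
      intro ks
      induction ks with
      | nil => intro _ hh; simp at hh
      | cons k rest ihk =>
        intro hpw hh
        by_cases hk : k = h
        · subst hk
          have hnz : count.getD k 0 ≠ 0 :=
            fun e => ((rel_zero_iff hRel k).mp e) (by simp)
          have hans : pvA_dfs t fuel (idx+1) true (count.modify k 0 (· - 1)) (result ++ [k])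
              = String.ofList (result ++ [k] ++ pr) := by
            have hre := rel_erase hRel (x := k) (by simp)
            rw [List.erase_cons_head] at hre
            exact ih (idx+1) _ pr (result ++ [k]) hre (by simpa using hlen) (by simp)
          have hne : pvA_dfs t fuel (idx+1) true (count.modify k 0 (· - 1)) (result ++ [k]) ≠ "" := by
            rw [hans]; exact ofList_ne_empty (by simp)
          simp only [pvA_loop, if_neg hnz]
          simp only [Bool.true_eq_false, false_and, if_false]
          rw [if_neg hne, hans]
          simp
        · have hh' : h ∈ rest := by
            rcases List.mem_cons.mp hh with e | e
            · exact absurd e.symm hk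
            · exact e
          have hklt : k < h := (List.pairwise_cons.mp hpw).1 h hh'
          have hz : count.getD k 0 = 0 := by
            rw [rel_zero_iff hRel]
            intro hkp
            exact absurd (hhead k hkp) (not_le.mpr hklt)
          simp only [pvA_loop, if_pos hz]
          exact ihk (List.pairwise_cons.mp hpw).2 hh'
    show pvA_dfs t (fuel+1) idx true count result = _
    rw [pvA_dfs, hRel.keys]
    exact key _ (PySem.List.sorted_ofList_pairwise_lt _)
      (by rw [PySem.List.mem_sorted]; exact (PySem.Set.mem_ofList _ _).mpr (hRel.sub h (by simp)))

-- the loop in non-greater mode, after the matching key is ruled out: first remaining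
-- character greater than x breaks, the rest fills ascending
theorem pvA_loop_gt (t L : List Char) (fuel idx : Nat) (count : PySem.Dict Char Int)
    (pool result : List Char) (x : Char)
    (hRel : PoolRel L count pool) (hlen : pool.length = fuel + 1)
    (hx : t.getD idx ' ' = x) :
    ∀ ks : List Char, ks.Pairwise (· < ·) → (∀ c ∈ pool, x < c → c ∈ ks) →
      (∀ c ∈ ks, count.getD c 0 ≠ 0 → c ≠ x) →
      pvA_loop t fuel idx false count result ks =
        (match pvB_find x pool with
         | some (a, y, b) => String.ofList (result ++ y :: (a ++ b))
         | none => "") := by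
  intro ks
  induction ks with
  | nil =>
    intro _ hcont _
    cases hf : pvB_find x pool with
    | none => simp [pvA_loop]
    | some p =>
      obtain ⟨a, y, b⟩ := p
      obtain ⟨hsplit, _, hxy⟩ := find_some_spec x pool a y b hf
      have hy : y ∈ pool := by rw [hsplit]; simp
      exact absurd (hcont y hy hxy) (by simp)
  | cons k rest ihk =>
    intro hpw hcont hnx
    by_cases hz : count.getD k 0 = 0
    · simp only [pvA_loop, if_pos hz]
      refine ihk (List.pairwise_cons.mp hpw).2 ?_ ?_
      · intro c hc hxc
        rcases List.mem_cons.mp (hcont c hc hxc) with e | e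
        · exact absurd ((rel_zero_iff hRel c).mp (e ▸ hz)) (not_not_intro hc)
        · exact e
      · exact fun c hc => hnx c (List.mem_cons_of_mem _ hc)
    · have hkpool : k ∈ pool := by
        by_contra hnk
        exact hz ((rel_zero_iff hRel k).mpr hnk)
      have hknex : k ≠ x := hnx k (by simp) hz
      by_cases hklt : k < x
      · simp only [pvA_loop, hx, if_neg hz, true_and]
        rw [if_pos hklt]
        refine ihk (List.pairwise_cons.mp hpw).2 ?_ ?_
        · intro c hc hxc
          rcases List.mem_cons.mp (hcont c hc hxc) with e | e
          · exact absurd (e ▸ hxc) (by subst e; exact fun h => absurd (h.trans hklt) (lt_irrefl x))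
          · exact e
        · exact fun c hc => hnx c (List.mem_cons_of_mem _ hc)
      · have hxk : x < k := lt_of_le_of_ne (not_lt.mp hklt) (Ne.symm hknex)
        have hans : pvA_dfs t fuel (idx+1) true (count.modify k 0 (· - 1)) (result ++ [k])
            = String.ofList (result ++ [k] ++ pool.erase k) := by
          refine dfs_greater t L fuel (idx+1) _ _ _ (rel_erase hRel hkpool) ?_ (by simp)
          have := List.length_erase_of_mem hkpool
          omega
        have hne : pvA_dfs t fuel (idx+1) true (count.modify k 0 (· - 1)) (result ++ [k]) ≠ "" := by
          rw [hans]; exact ofList_ne_empty (by simp)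
        simp only [pvA_loop, hx, if_neg hz, true_and]
        rw [if_neg hklt, if_neg hknex]
        rw [if_neg hne, hans]
        cases hf : pvB_find x pool with
        | none => exact absurd hxk (find_none_spec x pool hf k hkpool)
        | some p =>
          obtain ⟨a, y, b⟩ := p
          obtain ⟨hsplit, ha, hxy⟩ := find_some_spec x pool a y b hf
          have hy : y ∈ pool := by rw [hsplit]; simp
          have hka : k ∉ a := fun hk => (ha k hk) hxk
          have hyk : y = k := by
            -- y ≤ k from sortedness, k ≤ y from minimality via hcont/pairwise
            have hle : y ≤ k := by
              have hsorted := hRel.sorted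
              rw [hsplit] at hsorted
              rcases (List.mem_append.mp (hsplit ▸ hkpool)) with hk | hk
              · exact absurd hk hka
              · rcases List.mem_cons.mp hk with e | e
                · exact le_of_eq e.symm
                · exact (List.pairwise_cons.mp (List.pairwise_append.mp hsorted).2.1).1 k e
            rcases List.mem_cons.mp (hcont y hy hxy) with e | e
            · exact e
            · exact absurd ((List.pairwise_cons.mp hpw).1 y e) (not_lt.mpr hle)
          subst hyk
          have herase : pool.erase y = a ++ b := by
            rw [hsplit, List.erase_append_right _ hka, List.erase_cons_head]
          rw [herase]
          simp

-- the greedy "best answer from a matched prefix" that both programs compute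
def pvBest (t : List Char) : Nat → Nat → List Char → String
  | 0, _, _ => ""
  | fuel+1, i, pool =>
    let x := t.getD i ' '
    let deep := if i < t.length ∧ x ∈ pool then pvBest t fuel (i+1) (pool.erase x) else ""
    if deep = "" then
      match pvB_find x pool with
      | some (a, y, b) => String.ofList (t.take i ++ y :: (a ++ b))
      | none => ""
    else deep

theorem dfs_false (t L : List Char)
    (hPre : ¬ (t.length < L.length ∧ ∀ c ∈ t, t.count c ≤ L.count c)) :
    ∀ (fuel i : Nat) (pool : List Char) (count : PySem.Dict Char Int),
    PoolRel L count pool → pool.length = fuel → i + fuel = L.length → i ≤ t.length →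
    (∀ c, (t.take i).count c + pool.count c = L.count c) →
    pvA_dfs t fuel i false count (t.take i) = pvBest t fuel i pool := by
  intro fuel
  induction fuel with
  | zero =>
    intro i pool count hRel hlen hif hit hinv
    simp [pvA_dfs, pvBest]
  | succ fuel ih =>
    intro i pool count hRel hlen hif hit hinv
    have hit' : i < t.length := by
      rcases lt_or_eq_of_le hit with h | h
      · exact h
      · exfalso
        apply hPre
        refine ⟨by omega, fun c _ => ?_⟩
        have := hinv c
        rw [h, List.take_length] at this
        omega
    obtain ⟨x, hx⟩ : ∃ x, t.getD i ' ' = x := ⟨_, rfl⟩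
    have hx_eq : t[i]? = some x := by
      rw [List.getElem?_eq_getElem hit']
      rw [← hx]
      simp [List.getD, List.getElem?_eq_getElem hit']
    have htake : t.take (i+1) = t.take i ++ [x] := by
      rw [List.take_add_one, hx_eq]
      rfl
    have hmemSK : ∀ c ∈ pool,
        c ∈ PySem.List.sorted (PySem.Set.ofList L) (fun x => x) false := by
      intro c hc
      rw [PySem.List.mem_sorted]
      exact (PySem.Set.mem_ofList _ _).mpr (hRel.sub c hc)
    by_cases hmem : x ∈ pool
    · -- matching character available: deep attempt first
      have hRel' := rel_erase hRel hmem
      have hlen' : (pool.erase x).length = fuel := by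
        have := List.length_erase_of_mem hmem
        omega
      have hinv' : ∀ c, (t.take (i+1)).count c + (pool.erase x).count c = L.count c := by
        intro c
        by_cases hc : c = x
        · subst hc
          rw [htake, List.count_append, List.count_erase_self]
          have h1 := hinv c
          have h2 := List.count_pos_iff.mpr hmem
          simp
          omega
        · rw [htake, List.count_append, List.count_erase_of_ne hc]
          have h1 := hinv c
          have : [x].count c = 0 := by
            simp [List.count_singleton]
            exact fun e => hc e.symm
          omega
      have hdeep : pvA_dfs t fuel (i+1) false (count.modify x 0 (· - 1)) (t.take (i+1))
          = pvBest t fuel (i+1) (pool.erase x) :=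
        ih (i+1) (pool.erase x) _ hRel' hlen' (by omega) hit' hinv'
      have hbest : pvBest t (fuel+1) i pool =
          (if pvBest t fuel (i+1) (pool.erase x) = "" then
            (match pvB_find x pool with
             | some (a, y, b) => String.ofList (t.take i ++ y :: (a ++ b))
             | none => "")
           else pvBest t fuel (i+1) (pool.erase x)) := by
        conv_lhs => rw [pvBest]
        simp only [hx]
        rw [if_pos (show i < t.length ∧ x ∈ pool from ⟨hit', hmem⟩)]
      have key : ∀ ks : List Char, ks.Pairwise (· < ·) → x ∈ ks →
          (∀ c ∈ pool, x ≤ c → c ∈ ks) →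
          pvA_loop t fuel i false count (t.take i) ks = pvBest t (fuel+1) i pool := by
        intro ks
        induction ks with
        | nil => intro _ hxk _; simp at hxk
        | cons k rest ihk =>
          intro hpw hxk hcont
          have hxnz : count.getD x 0 ≠ 0 :=
            fun e => ((rel_zero_iff hRel x).mp e) hmem
          by_cases hz : count.getD k 0 = 0
          · have hkx : k ≠ x := fun e => hxnz (e ▸ hz)
            simp only [pvA_loop, if_pos hz]
            refine ihk (List.pairwise_cons.mp hpw).2 ?_ ?_
            · rcases List.mem_cons.mp hxk with e | e
              · exact absurd e.symm hkx
              · exact e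
            · intro c hc hxc
              rcases List.mem_cons.mp (hcont c hc hxc) with e | e
              · exact absurd ((rel_zero_iff hRel c).mp (e ▸ hz)) (not_not_intro hc)
              · exact e
          · have hkpool : k ∈ pool := by
              by_contra hnk
              exact hz ((rel_zero_iff hRel k).mpr hnk)
            by_cases hklt : k < x
            · have hkx : k ≠ x := fun e => absurd (e ▸ hklt) (lt_irrefl x)
              simp only [pvA_loop, hx, if_neg hz, true_and]
              rw [if_pos hklt]
              refine ihk (List.pairwise_cons.mp hpw).2 ?_ ?_
              · rcases List.mem_cons.mp hxk with e | e
                · exact absurd e.symm hkx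
                · exact e
              · intro c hc hxc
                rcases List.mem_cons.mp (hcont c hc hxc) with e | e
                · exact absurd hklt (not_lt.mpr (e ▸ hxc))
                · exact e
            · have hkx : k = x := by
                by_contra hne
                have hxrest : x ∈ rest := by
                  rcases List.mem_cons.mp hxk with e | e
                  · exact absurd e.symm hne
                  · exact e
                exact hklt ((List.pairwise_cons.mp hpw).1 x hxrest)
              have hkx' := hkx.symm
              subst hkx'
              have hans : pvA_dfs t fuel (i+1) false (count.modify x 0 (· - 1)) (t.take i ++ [x])
                  = pvBest t fuel (i+1) (pool.erase x) := by
                rw [← htake]; exact hdeep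
              simp only [pvA_loop, hx, if_neg hz, true_and]
              rw [if_neg (lt_irrefl x), if_pos (trivial : True), hans]
              by_cases hd : pvBest t fuel (i+1) (pool.erase x) = ""
              · rw [if_pos hd, hbest, if_pos hd]
                refine pvA_loop_gt t L fuel i count pool (t.take i) x hRel hlen hx rest
                  (List.pairwise_cons.mp hpw).2 ?_ ?_
                · intro c hc hxc
                  rcases List.mem_cons.mp (hcont c hc (le_of_lt hxc)) with e | e
                  · exact absurd (e ▸ hxc) (lt_irrefl x)
                  · exact e
                · intro c hc _
                  exact ne_of_gt ((List.pairwise_cons.mp hpw).1 c hc)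
              · rw [if_neg hd, hbest, if_neg hd]
      rw [pvA_dfs, hRel.keys]
      exact key _ (PySem.List.sorted_ofList_pairwise_lt _)
        (hmemSK x hmem) (fun c hc _ => hmemSK c hc)
    · -- no matching character: straight to the break at position i
      rw [pvA_dfs, hRel.keys]
      rw [pvA_loop_gt t L fuel i count pool (t.take i) x hRel hlen hx _
        (PySem.List.sorted_ofList_pairwise_lt _) (fun c hc _ => hmemSK c hc)
        (fun c _ hcz e => hmem (by
          subst e
          by_contra hnp
          exact hcz ((rel_zero_iff hRel c).mpr hnp)))]
      simp only [pvBest, hx]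
      rw [if_neg (show ¬(i < t.length ∧ x ∈ pool) from fun h => hmem h.2)]
      rw [if_pos rfl]

theorem pvBest_succ (t : List Char) (fuel i : Nat) (pool : List Char) :
    pvBest t (fuel+1) i pool =
      (if (if i < t.length ∧ t.getD i ' ' ∈ pool
            then pvBest t fuel (i+1) (pool.erase (t.getD i ' ')) else "") = ""
       then (match pvB_find (t.getD i ' ') pool with
             | some (a, y, b) => String.ofList (t.take i ++ y :: (a ++ b))
             | none => "")
       else (if i < t.length ∧ t.getD i ' ' ∈ pool
             then pvBest t fuel (i+1) (pool.erase (t.getD i ' ')) else "")) := rfl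

theorem walk_eq (t L : List Char)
    (hPre : ¬ (t.length < L.length ∧ ∀ c ∈ t, t.count c ≤ L.count c)) :
    ∀ (fuel i : Nat) (pool : List Char) (stack : List (List Char)),
    pool.length = fuel → i + fuel = L.length → i ≤ t.length → stack.length = i →
    (∀ c, (t.take i).count c + pool.count c = L.count c) →
    (pvB_phase2 t L.length (pvB_walk t L.length fuel i pool (pool :: stack)).2 =
      (if pvBest t fuel i pool = "" then pvB_phase2 t L.length stack else pvBest t fuel i pool))
    ∧ ¬ ((pvB_walk t L.length fuel i pool (pool :: stack)).1 = t.length ∧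
         (pvB_walk t L.length fuel i pool (pool :: stack)).1 < L.length) := by
  intro fuel
  induction fuel with
  | zero =>
    intro i pool stack hlen hif hit hstack hinv
    refine ⟨?_, ?_⟩
    · simp only [pvB_walk]
      rw [pvB_phase2]
      rw [if_neg (show ¬ (stack.length < L.length) by omega)]
      rw [pvBest]
      rw [if_pos rfl]
    · simp only [pvB_walk]
      omega
  | succ fuel ihw =>
    intro i pool stack hlen hif hit hstack hinv
    have hiL : i < L.length := by omega
    have hfull : i = t.length → False := by
      intro h
      apply hPre
      refine ⟨by omega, fun c _ => ?_⟩
      have := hinv c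
      rw [h, List.take_length] at this
      omega
    have hit' : i < t.length := by
      rcases lt_or_eq_of_le hit with h | h
      · exact h
      · exact absurd h hfull
    obtain ⟨x, hx⟩ : ∃ x, t.getD i ' ' = x := ⟨_, rfl⟩
    have hx_eq : t[i]? = some x := by
      rw [List.getElem?_eq_getElem hit']
      rw [← hx]
      simp [List.getD, List.getElem?_eq_getElem hit']
    have htake : t.take (i+1) = t.take i ++ [x] := by
      rw [List.take_add_one, hx_eq]
      rfl
    by_cases hmem : x ∈ pool
    · -- phase 1 takes a step
      have hcond : i < t.length ∧ t.getD i ' ' ∈ pool := ⟨hit', by rw [hx]; exact hmem⟩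
      have hwstep : pvB_walk t L.length (fuel+1) i pool (pool :: stack)
          = pvB_walk t L.length fuel (i+1) (pool.erase x)
              ((pool.erase x) :: (pool :: stack)) := by
        rw [pvB_walk, if_pos hcond, hx]
      have hinv' : ∀ c, (t.take (i+1)).count c + (pool.erase x).count c = L.count c := by
        intro c
        by_cases hc : c = x
        · subst hc
          rw [htake, List.count_append, List.count_erase_self]
          have h1 := hinv c
          have h2 := List.count_pos_iff.mpr hmem
          simp
          omega
        · rw [htake, List.count_append, List.count_erase_of_ne hc]
          have h1 := hinv c
          have : [x].count c = 0 := by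
            simp [List.count_singleton]
            exact fun e => hc e.symm
          omega
      have hlen' : (pool.erase x).length = fuel := by
        have := List.length_erase_of_mem hmem
        omega
      obtain ⟨h1, h2⟩ := ihw (i+1) (pool.erase x) (pool :: stack) hlen' (by omega) hit'
        (by simp [hstack]) hinv'
      refine ⟨?_, by rw [hwstep]; exact h2⟩
      rw [hwstep, h1]
      have hph : pvB_phase2 t L.length (pool :: stack) =
          (match pvB_find x pool with
           | some (a, y, b) => String.ofList (t.take i ++ y :: (a ++ b))
           | none => pvB_phase2 t L.length stack) := by
        rw [pvB_phase2]
        simp only [hstack, hx]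
        rw [if_pos hiL]
      rw [pvBest_succ, hx, if_pos (show i < t.length ∧ x ∈ pool from ⟨hit', hmem⟩)]
      by_cases hd : pvBest t fuel (i+1) (pool.erase x) = ""
      · rw [if_pos hd, if_pos hd, hph]
        cases hf : pvB_find x pool with
        | none => simp
        | some p =>
          obtain ⟨a, y, b⟩ := p
          simp only []
          rw [if_neg (ofList_ne_empty (by simp))]
      · rw [if_neg hd, if_neg hd, if_neg hd]
    · -- phase 1 stops at i
      have hcond : ¬ (i < t.length ∧ t.getD i ' ' ∈ pool) := by
        rw [hx]; exact fun h => hmem h.2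
      have hwstop : pvB_walk t L.length (fuel+1) i pool (pool :: stack) = (i, pool :: stack) := by
        rw [pvB_walk, if_neg hcond]
      refine ⟨?_, by rw [hwstop]; exact fun h => hfull h.1⟩
      rw [hwstop]
      rw [pvB_phase2]
      simp only [hstack, hx]
      rw [if_pos hiL]
      rw [pvBest_succ, hx,
        if_neg (show ¬ (i < t.length ∧ x ∈ pool) from fun h => hmem h.2), if_pos rfl]
      cases hf : pvB_find x pool with
      | none => simp
      | some p =>
        obtain ⟨a, y, b⟩ := p
        simp only []
        rw [if_neg (ofList_ne_empty (by simp))]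

theorem sorted_poolrel (L0 : List Char) :
    PoolRel (PySem.List.sorted L0 (fun x => x) false)
      (PySem.Dict.counter (PySem.List.sorted L0 (fun x => x) false))
      (PySem.List.sorted L0 (fun x => x) false) := by
  refine ⟨PySem.Dict.keys_counter _, ?_, ?_, fun c hc => hc⟩
  · intro c
    rw [PySem.Dict.getD_counter]
  · simpa using PySem.List.sorted_pairwise L0 (fun x => x)

theorem lexGreaterPermutation_spec : Claim_equal_lexGreaterPermutation := by
  intro s target _ hPre
  unfold Spec_lexGreaterPermutation
  have hLlen : (PySem.List.sorted s.toList (fun x => x) false).length = s.toList.length :=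
    PySem.List.length_sorted ..
  have hcnt : ∀ c, (PySem.List.sorted s.toList (fun x => x) false).count c = s.toList.count c :=
    fun c => (PySem.List.sorted_perm s.toList (fun x => x) false).count_eq c
  have hPre' : ¬ (target.toList.length < (PySem.List.sorted s.toList (fun x => x) false).length ∧
      ∀ c ∈ target.toList, target.toList.count c ≤
        (PySem.List.sorted s.toList (fun x => x) false).count c) := by
    intro ⟨h1, h2⟩
    exact hPre ⟨by omega, fun c hc => by rw [← hcnt c]; exact h2 c hc⟩
  have hA : lexGreaterPermutation s target
      = pvBest target.toList s.toList.length 0 (PySem.List.sorted s.toList (fun x => x) false) := by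
    show pvA_dfs target.toList s.toList.length 0 false
        (PySem.Dict.counter (PySem.List.sorted s.toList (fun x => x) false)) [] = _
    rw [show ([] : List Char) = target.toList.take 0 from rfl, ← hLlen]
    exact dfs_false target.toList _ hPre' _ 0 _ _ (sorted_poolrel s.toList) rfl
      (by omega) (by omega) (by simp)
  obtain ⟨h1, h2⟩ := walk_eq target.toList (PySem.List.sorted s.toList (fun x => x) false) hPre'
    (PySem.List.sorted s.toList (fun x => x) false).length 0
    (PySem.List.sorted s.toList (fun x => x) false) [] rfl (by omega) (by omega) rfl (by simp)
  have hB : lexGreaterPermutation_alt s target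
      = pvBest target.toList s.toList.length 0 (PySem.List.sorted s.toList (fun x => x) false) := by
    show (if (pvB_walk target.toList s.toList.length s.toList.length 0
            (PySem.List.sorted s.toList (fun x => x) false)
            [(PySem.List.sorted s.toList (fun x => x) false)]).1 = target.toList.length ∧
          (pvB_walk target.toList s.toList.length s.toList.length 0
            (PySem.List.sorted s.toList (fun x => x) false)
            [(PySem.List.sorted s.toList (fun x => x) false)]).1 < s.toList.length
        then _ else _) = _
    rw [← hLlen]
    rw [if_neg h2, h1]
    by_cases hd : pvBest target.toList
        (PySem.List.sorted s.toList (fun x => x) false).length 0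
        (PySem.List.sorted s.toList (fun x => x) false) = ""
    · rw [if_pos hd, hd]
      rfl
    · rw [if_neg hd]
  rw [hA, hB]

-- ===== VERDICT (by name: the statement is the Claim_ definition above) =====
theorem lexGreaterPermutation_raises : Claim_raises_lexGreaterPermutation := by
  unfold Claim_raises_lexGreaterPermutation
  refine ⟨fun s t _ h hp => hp h, by decide, ⟨by decide, ?_⟩, by decide⟩
  intro c hc
  simp only [pvRaiseWitness_lexGreaterPermutation] at hc ⊢
  have : c = 'a' := by simpa using hc
  subst this; decide

-- self-check: B's port really returns the stated value at the raise witness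
theorem pvRaiseWitnessOut_lexGreaterPermutation_ok :
    lexGreaterPermutation_alt pvRaiseWitness_lexGreaterPermutation.1
      pvRaiseWitness_lexGreaterPermutation.2 = pvRaiseWitnessOut_lexGreaterPermutation :=
  lexGreaterPermutation_raises.2.2.2
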